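-- pv_equiv track=rewrite | github.com/kzh980999074/my_leetcode | src/string/434. Number of Segments in a String.py | countSegments
-- ===== SOURCE A (Python) =====
-- def countSegments(s):
--
--     if not s :return 0
--     finded=False
--     length=len(s)
--     position=0
--     for i in range(length):
--         if s[i].isalpha():
--             finded=True
--             position=i
--             break
--     if not finded:return 0
--     count=1
--     position+=1
--     status=True
--     while position<length:
--         if status:
--             if not (s[position].isalpha() or s[position]=='\'' or s[position]=='-'):
--                 status=False
--             position+=1
--         else:
--             if s[position].isalpha():
--                 count+=1
--                 status=True
--             position+=1
--     return count
-- ===== SOURCE B (Python) =====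
-- def countSegments(s):
--     # group-then-filter: scan maximal runs of "word" chars (alpha, ' or -);
--     # each run counts as one segment iff it contains at least one letter
--     def keep(c):
--         return c.isalpha() or c == "'" or c == "-"
--     count = 0
--     i = 0
--     n = len(s)
--     while i < n:
--         if keep(s[i]):
--             has = False
--             while i < n and keep(s[i]):
--                 has = has or s[i].isalpha()
--                 i += 1
--             if has:
--                 count += 1
--         else:
--             i += 1
--     return count
-- ===== Notes on version B (the rewrite author's own statement) =====
-- stated objective: simpler
-- what changed: Replaced the two-phase find-first-letter + status/position state machine by a single run-scanning pass: skip separators, consume each maximal run of word characters (letters, apostrophe, hyphen) and count it iff it contains a letter.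
import Mathlib
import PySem

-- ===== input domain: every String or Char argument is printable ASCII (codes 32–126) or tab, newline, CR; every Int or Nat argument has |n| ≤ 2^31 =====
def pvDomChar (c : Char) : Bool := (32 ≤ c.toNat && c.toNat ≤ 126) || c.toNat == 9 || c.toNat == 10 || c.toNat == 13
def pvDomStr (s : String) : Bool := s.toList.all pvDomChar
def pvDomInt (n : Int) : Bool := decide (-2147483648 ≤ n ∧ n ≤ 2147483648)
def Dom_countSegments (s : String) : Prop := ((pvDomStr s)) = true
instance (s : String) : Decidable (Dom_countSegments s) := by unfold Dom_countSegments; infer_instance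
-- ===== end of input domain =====

-- B is a single run-scanning pass (count each maximal word-char run containing a letter)
-- instead of A's find-first-letter phase followed by a status/position state machine; same O(n) cost.

-- ===== PORT A =====
-- the for-loop searching the first alphabetic character; returns the suffix after it (position+1)
def pvFindA : List Char → Option (List Char)
  | [] => none
  | c :: rest => if PySem.Chars.isalpha c then some rest else pvFindA rest

-- the while-loop over position with the status flag
def pvLoopA : Bool → Int → List Char → Int
  | _, count, [] => count
  | status, count, c :: rest =>
    if status then
      if ¬ (PySem.Chars.isalpha c || c == '\'' || c == '-') then pvLoopA false count rest
      else pvLoopA true count rest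
    else
      if PySem.Chars.isalpha c then pvLoopA true (count + 1) rest
      else pvLoopA false count rest

def countSegments (s : String) : Int :=
  if s.toList.isEmpty then 0
  else
    match pvFindA s.toList with
    | none => 0
    | some rest => pvLoopA true 1 rest

-- ===== PORT B =====
def pvKeep (c : Char) : Bool := PySem.Chars.isalpha c || c == '\'' || c == '-'

-- inner while: consume the current run, tracking whether it contains a letter; return (has, remainder)
def pvRunB : List Char → Bool → Bool × List Char
  | [], has => (has, [])
  | c :: rest, has =>
    if pvKeep c then pvRunB rest (has || PySem.Chars.isalpha c) else (has, c :: rest)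

theorem pvRunB_length_le (l : List Char) (h : Bool) : (pvRunB l h).2.length ≤ l.length := by
  induction l generalizing h with
  | nil => simp [pvRunB]
  | cons c rest ih =>
    simp only [pvRunB]
    split
    · exact Nat.le_succ_of_le (ih _)
    · simp

-- outer while: skip a separator, or consume a whole run (first step of the inner loop inlined,
-- since its guard keep(s[i]) is known true) and count it iff it contains a letter
def pvOuterB : List Char → Int
  | [] => 0
  | c :: rest =>
    if pvKeep c then
      (if (pvRunB rest (PySem.Chars.isalpha c)).1 then 1 else 0)
        + pvOuterB (pvRunB rest (PySem.Chars.isalpha c)).2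
    else pvOuterB rest
termination_by l => l.length
decreasing_by
  · exact Nat.lt_succ_of_le (pvRunB_length_le rest (PySem.Chars.isalpha c))
  · simp

def countSegments_alt (s : String) : Int := pvOuterB s.toList

-- ===== PRECONDITION & SPEC =====
def Spec_countSegments (s : String) (out : Int) : Prop := out = countSegments_alt s
instance (s : String) (out : Int) : Decidable (Spec_countSegments s out) := by unfold Spec_countSegments; infer_instance

-- ===== CLAIM (what is proved, stated in full; the proofs are below) =====
def Claim_equal_countSegments : Prop := ∀ (s : String), Dom_countSegments s → Spec_countSegments s (countSegments s)

-- ===== LEMMAS AND PROOFS =====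

theorem pvLoopA_add (l : List Char) (st : Bool) (k : Int) :
    pvLoopA st k l = k + pvLoopA st 0 l := by
  induction l generalizing st k with
  | nil => simp [pvLoopA]
  | cons c rest ih =>
    simp only [pvLoopA]
    split
    · split
      · exact ih false k
      · exact ih true k
    · split
      · rw [ih true (k + 1), ih true (0 + 1)]; ring
      · exact ih false k

-- A's whole computation equals running the state machine from status = false
theorem pvLoopA_false_eq (l : List Char) :
    pvLoopA false 0 l = (match pvFindA l with | none => 0 | some rest => pvLoopA true 1 rest) := by
  induction l with
  | nil => simp [pvLoopA, pvFindA]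
  | cons c rest ih =>
    simp only [pvLoopA, pvFindA]
    by_cases h : PySem.Chars.isalpha c = true
    · simp [h]
    · simp [h, ih]

theorem pvRunB_fst_true (l : List Char) : (pvRunB l true).1 = true := by
  induction l with
  | nil => simp [pvRunB]
  | cons c rest ih =>
    simp only [pvRunB]
    split
    · simpa using ih
    · rfl

-- status-true state ↔ B scanning a run already known to contain a letter
theorem pvLoopA_true_runB (l : List Char) :
    pvLoopA true 0 l = pvLoopA false 0 (pvRunB l true).2 := by
  induction l with
  | nil => simp [pvLoopA, pvRunB]
  | cons c rest ih =>
    by_cases hk : pvKeep c = true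
    · have ha : (PySem.Chars.isalpha c || c == '\'' || c == '-') = true := hk
      simp only [pvLoopA, pvRunB, ha, hk]
      simpa using ih
    · have hc : (PySem.Chars.isalpha c = false ∧ ¬ c = '\'') ∧ ¬ c = '-' := by
        simpa [pvKeep] using hk
      have ha : (PySem.Chars.isalpha c || c == '\'' || c == '-') = false := by
        simp [hc.1.1, hc.1.2, hc.2]
      simp only [pvLoopA, pvRunB, ha, hk]
      simp [pvLoopA, hc.1.1]

-- status-false state ↔ B scanning a run with no letter seen yet
theorem pvLoopA_false_runB (l : List Char) :
    pvLoopA false 0 l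
      = (if (pvRunB l false).1 then 1 else 0) + pvLoopA false 0 (pvRunB l false).2 := by
  induction l with
  | nil => simp [pvLoopA, pvRunB]
  | cons c rest ih =>
    by_cases ha : PySem.Chars.isalpha c = true
    · have hk : pvKeep c = true := by simp [pvKeep, ha]
      have h1 : pvLoopA false 0 (c :: rest) = pvLoopA true (0 + 1) rest := by
        simp [pvLoopA, ha]
      have h2 : pvRunB (c :: rest) false = pvRunB rest true := by
        simp [pvRunB, hk, ha]
      rw [h1, h2, pvLoopA_add rest true (0 + 1), pvLoopA_true_runB rest,
        pvRunB_fst_true rest]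
      norm_num
    · by_cases hk : pvKeep c = true
      · have h1 : pvLoopA false 0 (c :: rest) = pvLoopA false 0 rest := by
          simp [pvLoopA, ha]
        have h2 : pvRunB (c :: rest) false = pvRunB rest false := by
          simp [pvRunB, hk, ha]
        rw [h1, h2, ih]
      · have h1 : pvLoopA false 0 (c :: rest) = pvLoopA false 0 rest := by
          simp [pvLoopA, ha]
        have h2 : pvRunB (c :: rest) false = (false, c :: rest) := by
          simp [pvRunB, hk]
        rw [h2]
        simp [h1]

-- main bridge, by strong induction on length: the state machine from
-- status = false equals B's run-scanning pass
theorem pvLoopA_false_eq_outerB_aux (n : Nat) :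
    ∀ l : List Char, l.length ≤ n → pvLoopA false 0 l = pvOuterB l := by
  induction n with
  | zero =>
    intro l h
    have : l = [] := List.eq_nil_of_length_eq_zero (Nat.le_zero.mp h)
    simp [this, pvLoopA, pvOuterB]
  | succ n ih =>
    intro l h
    cases l with
    | nil => simp [pvLoopA, pvOuterB]
    | cons c rest =>
      by_cases hk : pvKeep c = true
      · rw [pvOuterB, if_pos hk]
        have h2 : pvRunB (c :: rest) false = pvRunB rest (PySem.Chars.isalpha c) := by
          simp [pvRunB, hk]
        rw [pvLoopA_false_runB (c :: rest), h2,
          ih _ (le_trans (pvRunB_length_le rest (PySem.Chars.isalpha c))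
            (Nat.le_of_succ_le_succ h))]
      · have ha : PySem.Chars.isalpha c = false := by
          cases hca : PySem.Chars.isalpha c
          · rfl
          · exact absurd (by simp [pvKeep, hca]) hk
        rw [pvOuterB, if_neg hk]
        have h1 : pvLoopA false 0 (c :: rest) = pvLoopA false 0 rest := by
          simp [pvLoopA, ha]
        rw [h1, ih rest (Nat.le_of_succ_le_succ h)]

theorem pvLoopA_false_eq_outerB (l : List Char) : pvLoopA false 0 l = pvOuterB l :=
  pvLoopA_false_eq_outerB_aux l.length l (le_refl _)

-- ===== VERDICT (by name: the statement is the Claim_ definition above) =====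
theorem countSegments_spec : Claim_equal_countSegments := by
  intro s _
  unfold Spec_countSegments countSegments countSegments_alt
  have h := (pvLoopA_false_eq s.toList).symm.trans (pvLoopA_false_eq_outerB s.toList)
  by_cases he : s.toList.isEmpty = true
  · have hnil : s.toList = [] := by simpa [List.isEmpty_iff] using he
    simp [hnil, pvOuterB]
  · simpa [he] using h
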